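-- pv_equiv track=rewrite | github.com/EdsonEddy/perfilTesis2 | workspace_thesis/dataset/py-tests/1498/144598.py | entero
-- ===== SOURCE A (Python) =====
-- def entero(x):
--     x = int(x)
--     c = 0
--     foo = 0
--     while x > 0:
--         d = x % 10
--         x = x //10
--         foo = foo + (d * (2 ** c))
--         c += 1
--
--     return foo
-- ===== SOURCE B (Python) =====
-- def entero(x):
--     x = int(x)
--     if x <= 0:
--         return 0
--     return sum(int(d) * 2**i for i, d in enumerate(reversed(str(x))))
-- ===== Notes on version B (the rewrite author's own statement) =====
-- stated objective: idiomatic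
-- what changed: Instead of peeling decimal digits with a mod/div loop that maintains a counter and an accumulator, B takes the decimal string of the integer, reverses it, and sums each digit character weighted by the corresponding power of two via enumerate.
import Mathlib
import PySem

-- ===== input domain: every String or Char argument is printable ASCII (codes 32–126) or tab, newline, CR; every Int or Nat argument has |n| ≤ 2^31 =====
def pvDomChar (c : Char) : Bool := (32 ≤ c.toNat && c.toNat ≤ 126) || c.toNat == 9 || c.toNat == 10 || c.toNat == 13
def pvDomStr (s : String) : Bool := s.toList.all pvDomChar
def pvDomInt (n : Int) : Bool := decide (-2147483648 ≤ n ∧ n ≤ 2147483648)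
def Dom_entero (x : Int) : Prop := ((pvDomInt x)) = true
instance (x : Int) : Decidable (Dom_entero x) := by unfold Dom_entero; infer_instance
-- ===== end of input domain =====

-- B iterates the characters of str(x) (reversed, enumerated) instead of peeling
-- digits with a mod/div loop that maintains a counter and a power (idiomatic).

-- ===== PORT A =====
-- the while-loop of A: state (x, c, foo), one recursive call per iteration
def enteroLoop (x : Int) (c : Nat) (foo : Int) : Int :=
  if h : x > 0 then
    enteroLoop (PySem.Int.floordiv x 10) (c + 1) (foo + (PySem.Int.mod x 10) * 2 ^ c)
  else
    foo
termination_by x.toNat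
decreasing_by
  have h10 : PySem.Int.floordiv x 10 = x / 10 := PySem.Int.floordiv_eq_ediv_of_pos (by omega)
  have h2 : 10 * (x / 10) + x % 10 = x := Int.ediv_add_emod x 10
  have h3 : 0 ≤ x % 10 := Int.emod_nonneg x (by omega)
  have h4 : x % 10 < 10 := Int.emod_lt_of_pos x (by omega)
  omega

def entero (x : Int) : Int := enteroLoop x 0 0

-- ===== PORT B =====
-- sum(int(d) * 2**i for i, d in enumerate(reversed(str(x))))
-- int(d) on a single decimal-digit character is its code minus 48: exact here,
-- since str(x) for x > 0 consists of the characters '0'..'9' only.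
def entero_alt (x : Int) : Int :=
  if x ≤ 0 then 0
  else
    (PySem.List.enumerate ((PySem.Int.toChars x).reverse)).foldl
      (fun acc p => acc + ((p.2.toNat : Int) - 48) * 2 ^ p.1.toNat) 0

-- ===== PRECONDITION & SPEC =====
def Spec_entero (x : Int) (out : Int) : Prop := out = entero_alt x
instance (x : Int) (out : Int) : Decidable (Spec_entero x out) := by unfold Spec_entero; infer_instance

-- ===== CLAIM (what is proved, stated in full; the proofs are below) =====
def Claim_equal_entero : Prop := ∀ (x : Int), Dom_entero x → Spec_entero x (entero x)

-- ===== LEMMAS AND PROOFS =====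

-- proof-side weighted sum: value of a least-significant-first digit-char list, powers from s
def pvDigSum (cs : List Char) (s : Nat) : Int :=
  match cs with
  | [] => 0
  | c :: cs => ((c.toNat : Int) - 48) * 2 ^ s + pvDigSum cs (s + 1)

theorem pvDigSum_shift (cs : List Char) (s : Nat) :
    pvDigSum cs (s + 1) = 2 * pvDigSum cs s := by
  induction cs generalizing s with
  | nil => simp [pvDigSum]
  | cons c cs ih => simp [pvDigSum, ih, pow_succ]; ring

-- B's foldl over the enumerated list equals acc + pvDigSum
theorem foldl_enumerate_eq (cs : List Char) (s : Nat) (acc : Int) :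
    (PySem.List.enumerate cs (s : Int)).foldl
      (fun acc p => acc + ((p.2.toNat : Int) - 48) * 2 ^ p.1.toNat) acc
    = acc + pvDigSum cs s := by
  induction cs generalizing s acc with
  | nil => simp [PySem.List.enumerate_nil, pvDigSum]
  | cons c cs ih =>
    rw [PySem.List.enumerate_cons]
    simp only [List.foldl_cons]
    have : ((s : Int) + 1) = ((s + 1 : Nat) : Int) := by push_cast; ring
    rw [this, ih]
    simp [pvDigSum]
    ring

-- toDigitsCore: the accumulator is appended
theorem toDigitsCore_acc (f : Nat) : ∀ (n : Nat) (ds : List Char),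
    Nat.toDigitsCore 10 f n ds = Nat.toDigitsCore 10 f n [] ++ ds := by
  induction f with
  | zero => intro n ds; simp [Nat.toDigitsCore]
  | succ f ih =>
    intro n ds
    simp only [Nat.toDigitsCore]
    by_cases h : n / 10 = 0
    · simp [h]
    · simp only [h, if_false]
      rw [ih (n / 10) ((n % 10).digitChar :: ds), ih (n / 10) [(n % 10).digitChar]]
      simp

-- toDigitsCore: fuel above n is irrelevant
theorem toDigitsCore_fuel (n : Nat) : ∀ (f1 f2 : Nat), n < f1 → n < f2 →
    Nat.toDigitsCore 10 f1 n [] = Nat.toDigitsCore 10 f2 n [] := by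
  induction n using Nat.strong_induction_on with
  | _ n ih =>
    intro f1 f2 h1 h2
    obtain ⟨f1', rfl⟩ : ∃ k, f1 = k + 1 := ⟨f1 - 1, by omega⟩
    obtain ⟨f2', rfl⟩ : ∃ k, f2 = k + 1 := ⟨f2 - 1, by omega⟩
    simp only [Nat.toDigitsCore]
    by_cases h : n / 10 = 0
    · simp [h]
    · have hn10 : n / 10 < n := Nat.div_lt_self (by omega) (by omega)
      have hge : 10 ≤ n := by
        by_contra hc; exact h (Nat.div_eq_of_lt (by omega))
      simp only [h, if_false]
      rw [toDigitsCore_acc f1' (n / 10), toDigitsCore_acc f2' (n / 10),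
        ih (n / 10) hn10 f1' f2' (by omega) (by omega)]

-- structure of Nat.toDigits base 10
theorem toDigits_step (n : Nat) (h : 10 ≤ n) :
    Nat.toDigits 10 n = Nat.toDigits 10 (n / 10) ++ [(n % 10).digitChar] := by
  have h10 : ¬ n / 10 = 0 := by
    have := Nat.div_le_div_right (c := 10) h; omega
  show Nat.toDigitsCore 10 (n + 1) n [] = _
  simp only [Nat.toDigitsCore, h10, if_false]
  rw [toDigitsCore_acc n (n / 10)]
  congr 1
  exact toDigitsCore_fuel (n / 10) n (n / 10 + 1)
    (Nat.div_lt_self (by omega) (by omega)) (Nat.lt_succ_self _)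

theorem toDigits_small (n : Nat) (h : n < 10) :
    Nat.toDigits 10 n = [n.digitChar] := by
  have h10 : n / 10 = 0 := Nat.div_eq_of_lt h
  show Nat.toDigitsCore 10 (n + 1) n [] = _
  simp [Nat.toDigitsCore, h10, Nat.mod_eq_of_lt h]

theorem digitChar_val (d : Nat) (h : d < 10) :
    ((d.digitChar.toNat : Int) - 48) = (d : Int) := by
  interval_cases d <;> decide

-- B satisfies the doubling recursion on positive inputs
theorem entero_alt_pos (x : Int) (hx : 0 < x) :
    entero_alt x = PySem.Int.mod x 10 + 2 * entero_alt (PySem.Int.floordiv x 10) := by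
  have hd : PySem.Int.floordiv x 10 = x / 10 := PySem.Int.floordiv_eq_ediv_of_pos (by omega)
  have hm : PySem.Int.mod x 10 = x % 10 := PySem.Int.mod_eq_emod_of_pos (by omega)
  have hne : ¬ x < 0 := by omega
  have htc : PySem.Int.toChars x = Nat.toDigits 10 x.toNat := by
    simp [PySem.Int.toChars, hne]
  have hcast : ∀ (cs : List Char),
      (PySem.List.enumerate cs).foldl
        (fun acc p => acc + ((p.2.toNat : Int) - 48) * 2 ^ p.1.toNat) 0
      = pvDigSum cs 0 := by
    intro cs
    have := foldl_enumerate_eq cs 0 0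
    simpa using this
  by_cases hsm : x < 10
  · -- single digit: x // 10 = 0, the sum is just the digit
    have hx10 : x / 10 = 0 := by omega
    have hxm : x % 10 = x := by omega
    have hn : x.toNat < 10 := by omega
    rw [entero_alt, if_neg (by omega), htc, toDigits_small x.toNat hn]
    rw [entero_alt, hd, hx10, if_pos le_rfl]
    rw [hcast]
    simp [pvDigSum, digitChar_val x.toNat hn, hm, hxm]
    omega
  · have hge : 10 ≤ x.toNat := by omega
    have hstep := toDigits_step x.toNat hge
    have hdivpos : 0 < x / 10 := by
      have : 10 * (x / 10) + x % 10 = x := Int.ediv_add_emod x 10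
      have : x % 10 < 10 := Int.emod_lt_of_pos x (by omega)
      omega
    have hdivtoNat : (x / 10).toNat = x.toNat / 10 := by
      omega
    have hnd : ¬ x / 10 < 0 := by omega
    rw [entero_alt, if_neg (by omega), htc, hstep, hcast]
    rw [entero_alt, hd, if_neg (by omega)]
    have htc2 : PySem.Int.toChars (x / 10) = Nat.toDigits 10 ((x / 10).toNat) := by
      simp [PySem.Int.toChars, hnd]
    rw [htc2, hdivtoNat, hcast]
    rw [List.reverse_append]
    simp only [List.reverse_cons, List.reverse_nil, List.nil_append, List.singleton_append]
    rw [pvDigSum]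
    rw [pvDigSum_shift]
    have hm10 : x.toNat % 10 < 10 := Nat.mod_lt _ (by omega)
    rw [digitChar_val _ hm10]
    have : ((x.toNat % 10 : Nat) : Int) = x % 10 := by
      have : ((x.toNat : Int)) = x := Int.toNat_of_nonneg (by omega)
      omega
    rw [hm]
    omega

-- loop invariant: A's counter-and-power loop computes foo + 2^c * entero_alt
theorem enteroLoop_eq (n : Nat) : ∀ (x : Int) (c : Nat) (foo : Int), x.toNat = n →
    enteroLoop x c foo = foo + 2 ^ c * entero_alt x := by
  induction n using Nat.strong_induction_on with
  | _ n ih =>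
    intro x c foo hn
    rw [enteroLoop]
    by_cases h : x > 0
    · have h10 : PySem.Int.floordiv x 10 = x / 10 := PySem.Int.floordiv_eq_ediv_of_pos (by omega)
      have h2 : 10 * (x / 10) + x % 10 = x := Int.ediv_add_emod x 10
      have h3 : 0 ≤ x % 10 := Int.emod_nonneg x (by omega)
      have h4 : x % 10 < 10 := Int.emod_lt_of_pos x (by omega)
      have hrec := ih (PySem.Int.floordiv x 10).toNat (by omega)
        (PySem.Int.floordiv x 10) (c + 1) (foo + (PySem.Int.mod x 10) * 2 ^ c) rfl
      rw [entero_alt_pos x h]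
      simp only [h, dite_true, hrec]
      ring
    · have : entero_alt x = 0 := by rw [entero_alt, if_pos (by omega)]
      simp [h, this]

-- ===== VERDICT (by name: the statement is the Claim_ definition above) =====
theorem entero_spec : Claim_equal_entero := by
  intro x _
  unfold Spec_entero entero
  rw [enteroLoop_eq x.toNat x 0 0 rfl]
  ring
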